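-- pv_equiv track=rewrite | github.com/1988maciejt/aio2 | bin/libs/aio.py | numToCompressedString
-- ===== SOURCE A (Python) =====
-- def numToCompressedString(num : int) -> str:
--   result = ""
--   n = abs(num)
--   while n > 0:
--     x = n % 250
--     n = n // 250
--     result = chr(x+1) + result
--   if num < 0:
--     result += chr(252)
--   return result
-- ===== SOURCE B (Python) =====
-- def numToCompressedString(num : int) -> str:
--   n = abs(num)
--   p = 1
--   while p * 250 <= n:
--     p *= 250
--   result = ""
--   if n > 0:
--     while p >= 1:
--       result += chr(n // p + 1)
--       n %= p
--       p //= 250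
--   if num < 0:
--     result += chr(252)
--   return result
-- ===== Notes on version B (the rewrite author's own statement) =====
-- stated objective: alternative
-- what changed: B first finds the largest power of 250 not exceeding |num| and then emits digits most-significant-first by repeated division, appending to the result, instead of A's least-significant-first digit extraction with string prepending.
import Mathlib
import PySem

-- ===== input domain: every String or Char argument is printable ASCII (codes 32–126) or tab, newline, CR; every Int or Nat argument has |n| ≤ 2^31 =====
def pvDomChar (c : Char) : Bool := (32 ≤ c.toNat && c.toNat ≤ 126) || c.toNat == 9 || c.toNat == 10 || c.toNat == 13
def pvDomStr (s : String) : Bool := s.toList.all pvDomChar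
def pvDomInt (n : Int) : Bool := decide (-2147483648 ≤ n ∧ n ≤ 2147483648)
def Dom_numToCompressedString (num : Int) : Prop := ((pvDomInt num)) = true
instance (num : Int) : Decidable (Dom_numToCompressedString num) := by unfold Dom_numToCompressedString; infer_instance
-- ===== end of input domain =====

-- B emits the base-250 digits most-significant-first (after finding the top power of 250),
-- where A extracts them least-significant-first and prepends; same return value, different traversal.

-- ===== PORT A =====
-- the 'while n > 0' loop of A: prepend chr(n % 250 + 1), continue with n // 250
def numLoopA (n : Int) (result : List Char) : List Char :=
  if h : 0 < n then
    numLoopA (PySem.Int.floordiv n 250) (Char.ofNat ((PySem.Int.mod n 250) + 1).toNat :: result)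
  else result
termination_by n.toNat
decreasing_by
  rw [PySem.Int.floordiv_eq_ediv_of_pos (by norm_num)]
  omega

def numToCompressedString (num : Int) : String :=
  let result := numLoopA |num| []
  String.mk (if num < 0 then result ++ [Char.ofNat 252] else result)

-- ===== PORT B =====
-- 'while p * 250 <= n: p *= 250' (the '1 ≤ p' conjunct only makes the loop total; B always starts at p = 1)
def powLoopB (n p : Int) : Int :=
  if h : 1 ≤ p ∧ p * 250 ≤ n then powLoopB n (p * 250) else p
termination_by (n - p).toNat
decreasing_by
  have h1 : 1 * 249 ≤ p * 249 := mul_le_mul_of_nonneg_right h.1 (by norm_num)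
  have h2 := h.2
  omega

-- 'while p >= 1: append chr(n // p + 1); n %= p; p //= 250'
def emitLoopB (n p : Int) (result : List Char) : List Char :=
  if h : 1 ≤ p then
    emitLoopB (PySem.Int.mod n p) (PySem.Int.floordiv p 250)
      (result ++ [Char.ofNat ((PySem.Int.floordiv n p) + 1).toNat])
  else result
termination_by p.toNat
decreasing_by
  rw [PySem.Int.floordiv_eq_ediv_of_pos (by norm_num)]
  omega

def numToCompressedString_alt (num : Int) : String :=
  let n := |num|
  let p := powLoopB n 1
  let result := if 0 < n then emitLoopB n p [] else []
  String.mk (if num < 0 then result ++ [Char.ofNat 252] else result)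

-- ===== PRECONDITION & SPEC =====
def Spec_numToCompressedString (num : Int) (out : String) : Prop := out = numToCompressedString_alt num
instance (num : Int) (out : String) : Decidable (Spec_numToCompressedString num out) := by unfold Spec_numToCompressedString; infer_instance

-- ===== CLAIM (what is proved, stated in full; the proofs are below) =====
def Claim_equal_numToCompressedString : Prop := ∀ (num : Int), Dom_numToCompressedString num → Spec_numToCompressedString num (numToCompressedString num)

-- ===== LEMMAS AND PROOFS =====

-- base-250 digits of m, most-significant at the head, no leading zeros ([] for 0)
def digs (m : Nat) : List Char :=
  if h : m = 0 then [] else digs (m / 250) ++ [Char.ofNat (m % 250 + 1)]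
termination_by m
decreasing_by exact Nat.div_lt_self (Nat.pos_of_ne_zero h) (by norm_num)

-- the low k+1 base-250 digit positions of m, a zero digit written as chr 1
def pdigs : Nat → Nat → List Char
  | 0, m => [Char.ofNat (m + 1)]
  | k + 1, m => pdigs k (m / 250) ++ [Char.ofNat (m % 250 + 1)]

theorem numLoopA_eq_digs (m : Nat) (acc : List Char) :
    numLoopA (m : Int) acc = digs m ++ acc := by
  induction m using Nat.strong_induction_on generalizing acc with
  | _ m ih =>
    rw [numLoopA, digs]
    by_cases hm : m = 0
    · simp [hm]
    · have hpos : (0 : Int) < (m : Int) := by exact_mod_cast Nat.pos_of_ne_zero hm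
      rw [dif_pos hpos, dif_neg hm]
      have hd : PySem.Int.floordiv (m : Int) 250 = ((m / 250 : Nat) : Int) := by
        exact_mod_cast PySem.Int.floordiv_natCast m 250
      have hmod : PySem.Int.mod (m : Int) 250 = ((m % 250 : Nat) : Int) := by
        exact_mod_cast PySem.Int.mod_natCast m 250
      rw [hd, hmod, ih (m / 250) (Nat.div_lt_self (Nat.pos_of_ne_zero hm) (by norm_num))]
      have ht : (((m % 250 : Nat) : Int) + 1).toNat = m % 250 + 1 := by omega
      rw [ht]
      simp

-- pdigs peeled from the high end instead of the low end
theorem pdigs_cons (k m : Nat) :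
    pdigs (k + 1) m = Char.ofNat (m / 250 ^ (k + 1) + 1) :: pdigs k (m % 250 ^ (k + 1)) := by
  induction k generalizing m with
  | zero =>
    show pdigs 0 (m / 250) ++ [Char.ofNat (m % 250 + 1)] = _
    rw [pow_one, pdigs, pdigs]
    rfl
  | succ k ih =>
    show pdigs (k + 1) (m / 250) ++ [Char.ofNat (m % 250 + 1)] = _
    rw [ih]
    have h1 : m / 250 / 250 ^ (k + 1) = m / 250 ^ (k + 2) := by
      rw [Nat.div_div_eq_div_mul, ← pow_succ']
    have h2 : m / 250 % 250 ^ (k + 1) = m % 250 ^ (k + 2) / 250 := by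
      rw [← Nat.mod_mul_right_div_self m 250 (250 ^ (k + 1)), ← pow_succ']
    have h3 : m % 250 ^ (k + 2) % 250 = m % 250 :=
      Nat.mod_mod_of_dvd m (dvd_pow_self 250 (by omega))
    rw [h1, h2]
    show _ = Char.ofNat (m / 250 ^ (k + 2) + 1) :: (pdigs k (m % 250 ^ (k + 2) / 250) ++ [Char.ofNat (m % 250 ^ (k + 2) % 250 + 1)])
    rw [h3]
    rfl

theorem emitLoopB_eq_pdigs (k : Nat) (m : Nat) (acc : List Char) :
    emitLoopB (m : Int) ((250 ^ k : Nat) : Int) acc = acc ++ pdigs k m := by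
  induction k generalizing m acc with
  | zero =>
    have e0 : ((250 ^ 0 : Nat) : Int) = 1 := by norm_num
    rw [e0, emitLoopB, dif_pos (by norm_num)]
    have hfd : PySem.Int.floordiv 1 250 = 0 := by decide
    have hnd : PySem.Int.floordiv (m : Int) 1 = (m : Int) := by
      rw [PySem.Int.floordiv_eq_ediv_of_pos (by norm_num)]
      exact Int.ediv_one (m : Int)
    rw [hfd, hnd, emitLoopB, dif_neg (by norm_num)]
    have ht : ((m : Int) + 1).toNat = m + 1 := by omega
    rw [ht, pdigs]
  | succ k ih =>
    have hppos : (1 : Int) ≤ ((250 ^ (k + 1) : Nat) : Int) := by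
      exact_mod_cast Nat.one_le_iff_ne_zero.mpr (by positivity)
    rw [emitLoopB, dif_pos hppos]
    have hd : PySem.Int.floordiv (m : Int) ((250 ^ (k + 1) : Nat) : Int)
        = ((m / 250 ^ (k + 1) : Nat) : Int) := by
      exact_mod_cast PySem.Int.floordiv_natCast m (250 ^ (k + 1))
    have hm : PySem.Int.mod (m : Int) ((250 ^ (k + 1) : Nat) : Int)
        = ((m % 250 ^ (k + 1) : Nat) : Int) := by
      exact_mod_cast PySem.Int.mod_natCast m (250 ^ (k + 1))
    have hp : PySem.Int.floordiv ((250 ^ (k + 1) : Nat) : Int) 250 = ((250 ^ k : Nat) : Int) := by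
      have hq : (250 ^ (k + 1) : Nat) / 250 = 250 ^ k := by
        rw [pow_succ, Nat.mul_div_cancel _ (by norm_num)]
      calc PySem.Int.floordiv ((250 ^ (k + 1) : Nat) : Int) 250
          = ((250 ^ (k + 1) / 250 : Nat) : Int) := by
            exact_mod_cast PySem.Int.floordiv_natCast (250 ^ (k + 1)) 250
        _ = ((250 ^ k : Nat) : Int) := by rw [hq]
    rw [hd, hm, hp, ih]
    have ht : (((m / 250 ^ (k + 1) : Nat) : Int) + 1).toNat = m / 250 ^ (k + 1) + 1 := by
      generalize m / 250 ^ (k + 1) = a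
      omega
    rw [ht, pdigs_cons]
    simp

theorem digs_eq_pdigs (k m : Nat) (hlo : 250 ^ k ≤ m) (hhi : m < 250 ^ (k + 1)) :
    digs m = pdigs k m := by
  induction k generalizing m with
  | zero =>
    have hm0 : m ≠ 0 := by simpa using Nat.one_le_iff_ne_zero.mp (by simpa using hlo)
    rw [digs, dif_neg hm0]
    have : m / 250 = 0 := Nat.div_eq_of_lt (by simpa using hhi)
    rw [this, digs, dif_pos rfl, pdigs, Nat.mod_eq_of_lt (by simpa using hhi)]
    simp
  | succ k ih =>
    have hm0 : m ≠ 0 := by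
      have : 0 < 250 ^ (k + 1) := by positivity
      omega
    rw [digs, dif_neg hm0]
    have hlo' : 250 ^ k ≤ m / 250 := by
      rw [Nat.le_div_iff_mul_le (by norm_num)]
      calc 250 ^ k * 250 = 250 ^ (k + 1) := (pow_succ 250 k).symm
        _ ≤ m := hlo
    have hhi' : m / 250 < 250 ^ (k + 1) := by
      rw [Nat.div_lt_iff_lt_mul (by norm_num)]
      calc m < 250 ^ (k + 2) := hhi
        _ = 250 ^ (k + 1) * 250 := pow_succ 250 (k+1)
    rw [ih (m / 250) hlo' hhi']
    rfl

-- recursive specification of powLoopB: it returns p times the largest power of 250 keeping it ≤ n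
theorem powLoopB_spec (n p : Int) (hp : 1 ≤ p) (hpn : p ≤ n) :
    ∃ k : Nat, powLoopB n p = p * 250 ^ k ∧ powLoopB n p ≤ n ∧ n < powLoopB n p * 250 := by
  rw [powLoopB]
  by_cases h : p * 250 ≤ n
  · rw [dif_pos ⟨hp, h⟩]
    obtain ⟨k, h1, h2, h3⟩ := powLoopB_spec n (p * 250) (by nlinarith) h
    exact ⟨k + 1, by rw [h1]; ring, h2, h3⟩
  · rw [dif_neg (by tauto)]
    exact ⟨0, by ring, hpn, not_le.mp h⟩
termination_by (n - p).toNat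
decreasing_by
  have h1 : 1 * 249 ≤ p * 249 := mul_le_mul_of_nonneg_right hp (by norm_num)
  omega

-- ===== VERDICT (by name: the statement is the Claim_ definition above) =====
theorem numToCompressedString_spec : Claim_equal_numToCompressedString := by
  intro num _
  unfold Spec_numToCompressedString numToCompressedString numToCompressedString_alt
  have habs : |num| = ((num.natAbs : Nat) : Int) := (Int.abs_eq_natAbs num)
  set m : Nat := num.natAbs with hm
  have hcore : numLoopA |num| [] =
      (if 0 < |num| then emitLoopB |num| (powLoopB |num| 1) [] else []) := by
    by_cases h0 : m = 0
    · have : |num| = 0 := by rw [habs, h0]; rfl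
      rw [this, numLoopA]
      norm_num
    · have hpos : (0 : Int) < |num| := by rw [habs]; exact_mod_cast Nat.pos_of_ne_zero h0
      rw [if_pos hpos]
      have hm1 : (1 : Int) ≤ |num| := hpos
      obtain ⟨k, hk1, hk2, hk3⟩ := powLoopB_spec |num| 1 le_rfl hm1
      rw [one_mul] at hk1
      have hkcast : powLoopB |num| 1 = ((250 ^ k : Nat) : Int) := by rw [hk1]; push_cast; ring
      have hkcast' : powLoopB ((m : Nat) : Int) 1 = ((250 ^ k : Nat) : Int) := by
        rw [← habs]; exact hkcast
      have hlo : 250 ^ k ≤ m := by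
        rw [hkcast, habs] at hk2; exact_mod_cast hk2
      have hhi : m < 250 ^ (k + 1) := by
        rw [hkcast, habs] at hk3
        have h2 : m < 250 ^ k * 250 := by exact_mod_cast hk3
        calc m < 250 ^ k * 250 := h2
          _ = 250 ^ (k + 1) := (pow_succ 250 k).symm
      rw [habs, hkcast', numLoopA_eq_digs, emitLoopB_eq_pdigs, digs_eq_pdigs k m hlo hhi]
      simp
  rw [hcore]
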